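-- pv_equiv track=rewrite | github.com/bitscopic/BIAS-2015 | src/bias_2015/extract_from_nirvana_json.py | return_clinvar_significance
-- ===== SOURCE A (Python) =====
-- def return_clinvar_significance(clin_var_sig_list):
--     """
--     Return the most high rates (pathogenic) clinvar significance seen
--     """
--     valid_significance = set()
--     for sig in clin_var_sig_list:
--         valid_significance.add(sig)
--     most_sig = ""
--     for element in valid_significance:
--         if element.lower() == "pathogenic":
--             return "pathogenic"
--         if element.lower() == "likely pathogenic":
--             most_sig = "likely pathogenic"
--         if element.lower() == "uncertain" and most_sig != "likely pathogenic":
--             most_sig = "uncertain"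
--         if element.lower() == "likely benign" and most_sig != "uncertain" and  most_sig != "likely pathogenic":
--             most_sig = "likely benign"
--         if element.lower() == "benign" and most_sig != "likely benign" and most_sig != "uncertain" and  most_sig != "likely pathogenic":
--             most_sig = "benign"
--     return most_sig
-- ===== SOURCE B (Python) =====
-- def return_clinvar_significance(clin_var_sig_list):
--     """
--     Return the most high rates (pathogenic) clinvar significance seen
--     """
--     seen = set()
--     for sig in clin_var_sig_list:
--         seen.add(sig.lower())
--     for sig in ["pathogenic", "likely pathogenic", "uncertain", "likely benign", "benign"]:
--         if sig in seen:
--             return sig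
--     return ""
-- ===== Notes on version B (the rewrite author's own statement) =====
-- stated objective: simpler
-- what changed: Instead of scanning the data while threading a most_sig accumulator through guarded branches, B builds a set of lowercased significances once and probes the fixed priority list [pathogenic, likely pathogenic, uncertain, likely benign, benign], returning the first one present.
import Mathlib
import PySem

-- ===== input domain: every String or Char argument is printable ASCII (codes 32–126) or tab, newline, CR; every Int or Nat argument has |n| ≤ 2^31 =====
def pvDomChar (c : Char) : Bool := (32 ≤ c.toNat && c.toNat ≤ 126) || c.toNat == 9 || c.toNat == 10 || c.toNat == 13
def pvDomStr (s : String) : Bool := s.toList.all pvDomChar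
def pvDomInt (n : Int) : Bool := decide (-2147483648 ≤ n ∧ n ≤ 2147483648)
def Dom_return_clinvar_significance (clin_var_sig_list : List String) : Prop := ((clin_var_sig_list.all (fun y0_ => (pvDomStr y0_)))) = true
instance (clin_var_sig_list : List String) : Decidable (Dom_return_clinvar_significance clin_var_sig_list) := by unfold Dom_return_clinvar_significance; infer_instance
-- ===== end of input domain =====

-- B replaces A's accumulator-threading scan of the data by a lowercased set built once
-- and a probe of the fixed priority list (objective: simpler). The result does not depend
-- on the iteration order of A's set, which is what the equivalence proof establishes.

-- ===== PORT A =====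
-- the three guarded 'if' updates of most_sig in A's loop body (after the pathogenic check)
def pvStepA (element most_sig : String) : String :=
  let m1 := if PySem.Str.lower element = "likely pathogenic" then "likely pathogenic" else most_sig
  let m2 := if PySem.Str.lower element = "uncertain" ∧ m1 ≠ "likely pathogenic" then "uncertain" else m1
  let m3 := if PySem.Str.lower element = "likely benign" ∧ m2 ≠ "uncertain" ∧ m2 ≠ "likely pathogenic" then "likely benign" else m2
  if PySem.Str.lower element = "benign" ∧ m3 ≠ "likely benign" ∧ m3 ≠ "uncertain" ∧ m3 ≠ "likely pathogenic" then "benign" else m3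

-- the 'for element in valid_significance' loop, with the early 'return "pathogenic"'
def pvLoopA : List String → String → String
  | [], most_sig => most_sig
  | element :: rest, most_sig =>
    if PySem.Str.lower element = "pathogenic" then "pathogenic"
    else pvLoopA rest (pvStepA element most_sig)

def return_clinvar_significance (clin_var_sig_list : List String) : String :=
  let valid_significance : PySem.Set String :=
    clin_var_sig_list.foldl (fun s sig => PySem.Set.add s sig) PySem.Set.empty
  pvLoopA valid_significance ""

-- ===== PORT B =====
-- the 'for sig in [priorities]' loop, returning the first priority found in the set
def pvLoopB : List String → PySem.Set String → String
  | [], _ => ""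
  | sig :: rest, seen => if PySem.Set.contains seen sig then sig else pvLoopB rest seen

def return_clinvar_significance_alt (clin_var_sig_list : List String) : String :=
  let seen : PySem.Set String :=
    clin_var_sig_list.foldl (fun s sig => PySem.Set.add s (PySem.Str.lower sig)) PySem.Set.empty
  pvLoopB ["pathogenic", "likely pathogenic", "uncertain", "likely benign", "benign"] seen

-- ===== PRECONDITION & SPEC =====
def Spec_return_clinvar_significance (clin_var_sig_list : List String) (out : String) : Prop := out = return_clinvar_significance_alt clin_var_sig_list
instance (clin_var_sig_list : List String) (out : String) : Decidable (Spec_return_clinvar_significance clin_var_sig_list out) := by unfold Spec_return_clinvar_significance; infer_instance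

-- ===== CLAIM (what is proved, stated in full; the proofs are below) =====
def Claim_equal_return_clinvar_significance : Prop := ∀ (clin_var_sig_list : List String), Dom_return_clinvar_significance clin_var_sig_list → Spec_return_clinvar_significance clin_var_sig_list (return_clinvar_significance clin_var_sig_list)

-- ===== LEMMAS AND PROOFS =====

-- severity rank of a (lowercased) significance string, 0 for anything unrecognised
def pvRank (s : String) : Nat :=
  if s = "pathogenic" then 5
  else if s = "likely pathogenic" then 4
  else if s = "uncertain" then 3
  else if s = "likely benign" then 2
  else if s = "benign" then 1
  else 0

def pvRankOf (x : String) : Nat := pvRank (PySem.Str.lower x)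

def pvStr : Nat → String
  | 5 => "pathogenic"
  | 4 => "likely pathogenic"
  | 3 => "uncertain"
  | 2 => "likely benign"
  | 1 => "benign"
  | _ => ""

-- maximal rank occurring in a list
def pvMr : List String → Nat
  | [] => 0
  | x :: xs => max (pvRankOf x) (pvMr xs)

lemma pvRank_le (s : String) : pvRank s ≤ 5 := by
  unfold pvRank; split_ifs <;> omega

lemma pvMr_le (xs : List String) : pvMr xs ≤ 5 := by
  induction xs with
  | nil => simp [pvMr]
  | cons x xs ih => simp [pvMr]; exact ⟨pvRank_le _, ih⟩

lemma pvMr_ge_mem {x : String} {xs : List String} (h : x ∈ xs) : pvRankOf x ≤ pvMr xs := by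
  induction xs with
  | nil => cases h
  | cons y ys ih =>
    rcases List.mem_cons.mp h with rfl | h
    · exact le_max_left _ _
    · exact le_trans (ih h) (le_max_right _ _)

lemma pvMr_attained {xs : List String} (h : pvMr xs ≠ 0) : ∃ x ∈ xs, pvRankOf x = pvMr xs := by
  induction xs with
  | nil => simp [pvMr] at h
  | cons y ys ih =>
    by_cases hc : pvMr ys ≤ pvRankOf y
    · exact ⟨y, by simp, by simp [pvMr]; omega⟩
    · have hne : pvMr ys ≠ 0 := by omega
      obtain ⟨x, hx, hr⟩ := ih hne
      exact ⟨x, by simp [hx], by simp [pvMr]; omega⟩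

lemma pvMr_le_iff {xs : List String} {n : Nat} : pvMr xs ≤ n ↔ ∀ x ∈ xs, pvRankOf x ≤ n := by
  induction xs with
  | nil => simp [pvMr]
  | cons y ys ih => simp [pvMr, ih]

lemma pvMr_eq_of_mem_iff {l l' : List String} (h : ∀ x, x ∈ l ↔ x ∈ l') : pvMr l = pvMr l' := by
  apply Nat.le_antisymm
  · exact pvMr_le_iff.mpr fun x hx => pvMr_ge_mem ((h x).mp hx)
  · exact pvMr_le_iff.mpr fun x hx => pvMr_ge_mem ((h x).mpr hx)

-- the A-loop computes the max severity of its accumulator and its input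
lemma pvStepA_eq (e : String) (k : Nat) (hk : k ≤ 4) (h5 : PySem.Str.lower e ≠ "pathogenic") :
    pvStepA e (pvStr k) = pvStr (max k (pvRankOf e)) := by
  unfold pvStepA pvRankOf pvRank
  interval_cases k <;> split_ifs <;> simp_all [pvStr]

lemma pvLoopA_eq (xs : List String) : ∀ (k : Nat), k ≤ 4 →
    pvLoopA xs (pvStr k) = pvStr (max k (pvMr xs)) := by
  induction xs with
  | nil => intro k hk; simp [pvLoopA, pvMr]
  | cons e rest ih =>
    intro k hk
    simp only [pvLoopA]
    by_cases h5 : PySem.Str.lower e = "pathogenic"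
    · have hmr : pvMr rest ≤ 5 := pvMr_le rest
      have hre : pvRankOf e = 5 := by simp [pvRankOf, h5, pvRank]
      have hmax : max k (pvMr (e :: rest)) = 5 := by simp [pvMr]; omega
      rw [if_pos h5, hmax]
      rfl
    · rw [if_neg h5]
      have hre : pvRankOf e ≤ 4 := by
        unfold pvRankOf pvRank; split_ifs <;> first | (exact absurd ‹_› h5) | omega
      have hmax : max (max k (pvRankOf e)) (pvMr rest) = max k (pvMr (e :: rest)) := by
        simp only [pvMr]; omega
      rw [pvStepA_eq e k hk h5, ih (max k (pvRankOf e)) (by omega), hmax]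

lemma pvSeen_eq (xs : List String) :
    xs.foldl (fun s sig => PySem.Set.add s (PySem.Str.lower sig)) PySem.Set.empty
      = PySem.Set.ofList (xs.map PySem.Str.lower) := by
  rw [PySem.Set.ofList_eq_foldl, List.foldl_map]; rfl

lemma pvRank_eq_high {l : String} {j : Nat} (h1 : 1 ≤ j) (h5 : j ≤ 5) :
    pvRank l = j ↔ l = pvStr j := by
  interval_cases j <;> (unfold pvRank; split_ifs <;> simp_all [pvStr])

lemma pvContains_iff (xs : List String) (j : Nat) (h1 : 1 ≤ j) (h5 : j ≤ 5) :
    PySem.Set.contains (PySem.Set.ofList (xs.map PySem.Str.lower)) (pvStr j) = true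
      ↔ ∃ x ∈ xs, pvRankOf x = j := by
  rw [PySem.Set.contains_iff, PySem.Set.mem_ofList, List.mem_map]
  constructor
  · rintro ⟨x, hx, hl⟩
    exact ⟨x, hx, by unfold pvRankOf; rw [hl]; exact (pvRank_eq_high h1 h5).mpr rfl⟩
  · rintro ⟨x, hx, hr⟩
    exact ⟨x, hx, (pvRank_eq_high h1 h5).mp hr⟩

lemma pvLoopB_eq (xs : List String) :
    pvLoopB ["pathogenic", "likely pathogenic", "uncertain", "likely benign", "benign"]
      (PySem.Set.ofList (xs.map PySem.Str.lower)) = pvStr (pvMr xs) := by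
  have hle := pvMr_le xs
  have hnotin : ∀ j : Nat, 1 ≤ j → j ≤ 5 → pvMr xs < j →
      PySem.Set.contains (PySem.Set.ofList (xs.map PySem.Str.lower)) (pvStr j) = false := by
    intro j h1 h5 hlt
    rw [Bool.eq_false_iff, ne_eq, pvContains_iff xs j h1 h5]
    rintro ⟨x, hx, hr⟩
    have := pvMr_ge_mem hx
    omega
  have hin : pvMr xs ≠ 0 →
      PySem.Set.contains (PySem.Set.ofList (xs.map PySem.Str.lower)) (pvStr (pvMr xs)) = true := by
    intro h0
    rw [pvContains_iff xs (pvMr xs) (by omega) hle]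
    exact pvMr_attained h0
  set k := pvMr xs with hk
  interval_cases k
  · have c5 : PySem.Set.contains (PySem.Set.ofList (xs.map PySem.Str.lower)) "pathogenic" = false := hnotin 5 (by omega) (by omega) (by omega)
    have c4 : PySem.Set.contains (PySem.Set.ofList (xs.map PySem.Str.lower)) "likely pathogenic" = false := hnotin 4 (by omega) (by omega) (by omega)
    have c3 : PySem.Set.contains (PySem.Set.ofList (xs.map PySem.Str.lower)) "uncertain" = false := hnotin 3 (by omega) (by omega) (by omega)
    have c2 : PySem.Set.contains (PySem.Set.ofList (xs.map PySem.Str.lower)) "likely benign" = false := hnotin 2 (by omega) (by omega) (by omega)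
    have c1 : PySem.Set.contains (PySem.Set.ofList (xs.map PySem.Str.lower)) "benign" = false := hnotin 1 (by omega) (by omega) (by omega)
    simp only [pvLoopB, c5, c4, c3, c2, c1]
    rfl
  · have c5 : PySem.Set.contains (PySem.Set.ofList (xs.map PySem.Str.lower)) "pathogenic" = false := hnotin 5 (by omega) (by omega) (by omega)
    have c4 : PySem.Set.contains (PySem.Set.ofList (xs.map PySem.Str.lower)) "likely pathogenic" = false := hnotin 4 (by omega) (by omega) (by omega)
    have c3 : PySem.Set.contains (PySem.Set.ofList (xs.map PySem.Str.lower)) "uncertain" = false := hnotin 3 (by omega) (by omega) (by omega)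
    have c2 : PySem.Set.contains (PySem.Set.ofList (xs.map PySem.Str.lower)) "likely benign" = false := hnotin 2 (by omega) (by omega) (by omega)
    have c1 : PySem.Set.contains (PySem.Set.ofList (xs.map PySem.Str.lower)) "benign" = true := hin (by omega)
    simp only [pvLoopB, c5, c4, c3, c2, c1]
    rfl
  · have c5 : PySem.Set.contains (PySem.Set.ofList (xs.map PySem.Str.lower)) "pathogenic" = false := hnotin 5 (by omega) (by omega) (by omega)
    have c4 : PySem.Set.contains (PySem.Set.ofList (xs.map PySem.Str.lower)) "likely pathogenic" = false := hnotin 4 (by omega) (by omega) (by omega)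
    have c3 : PySem.Set.contains (PySem.Set.ofList (xs.map PySem.Str.lower)) "uncertain" = false := hnotin 3 (by omega) (by omega) (by omega)
    have c2 : PySem.Set.contains (PySem.Set.ofList (xs.map PySem.Str.lower)) "likely benign" = true := hin (by omega)
    simp only [pvLoopB, c5, c4, c3, c2]
    rfl
  · have c5 : PySem.Set.contains (PySem.Set.ofList (xs.map PySem.Str.lower)) "pathogenic" = false := hnotin 5 (by omega) (by omega) (by omega)
    have c4 : PySem.Set.contains (PySem.Set.ofList (xs.map PySem.Str.lower)) "likely pathogenic" = false := hnotin 4 (by omega) (by omega) (by omega)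
    have c3 : PySem.Set.contains (PySem.Set.ofList (xs.map PySem.Str.lower)) "uncertain" = true := hin (by omega)
    simp only [pvLoopB, c5, c4, c3]
    rfl
  · have c5 : PySem.Set.contains (PySem.Set.ofList (xs.map PySem.Str.lower)) "pathogenic" = false := hnotin 5 (by omega) (by omega) (by omega)
    have c4 : PySem.Set.contains (PySem.Set.ofList (xs.map PySem.Str.lower)) "likely pathogenic" = true := hin (by omega)
    simp only [pvLoopB, c5, c4]
    rfl
  · have c5 : PySem.Set.contains (PySem.Set.ofList (xs.map PySem.Str.lower)) "pathogenic" = true := hin (by omega)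
    simp only [pvLoopB, c5]
    rfl

-- ===== VERDICT (by name: the statement is the Claim_ definition above) =====
theorem return_clinvar_significance_spec : Claim_equal_return_clinvar_significance := by
  intro xs _
  unfold Spec_return_clinvar_significance return_clinvar_significance return_clinvar_significance_alt
  rw [pvSeen_eq, pvLoopB_eq]
  have hset : xs.foldl (fun s sig => PySem.Set.add s sig) PySem.Set.empty = PySem.Set.ofList xs := by
    rw [PySem.Set.ofList_eq_foldl]; rfl
  rw [hset]
  have h0 : ("" : String) = pvStr 0 := rfl
  rw [h0, pvLoopA_eq _ 0 (by omega)]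
  have : pvMr (PySem.Set.ofList xs) = pvMr xs :=
    pvMr_eq_of_mem_iff fun x => PySem.Set.mem_ofList xs x
  simp [this]
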